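-- pv_equiv track=rewrite | github.com/louise-zy/youtubemonitor | youtube_rss_monitor.py | _select_format
-- ===== SOURCE A (Python) =====
-- from typing import List, Dict, Optional, Sequence
--
-- def _select_format(formats: List[Dict]) -> Optional[Dict]:
--     if not formats:
--         return None
--     for preferred_ext in ("vtt", "srt"):
--         for fmt in formats:
--             if fmt.get("ext") == preferred_ext and fmt.get("url"):
--                 return fmt
--     for fmt in formats:
--         if fmt.get("url"):
--             return fmt
--     return None
-- ===== SOURCE B (Python) =====
-- def _select_format(formats):
--     # Single pass with prioritized first-seen slots instead of three sequential scans.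
--     best_vtt = best_srt = best_any = None
--     for fmt in formats:
--         if not fmt.get("url"):
--             continue
--         ext = fmt.get("ext")
--         if best_vtt is None and ext == "vtt":
--             best_vtt = fmt
--         if best_srt is None and ext == "srt":
--             best_srt = fmt
--         if best_any is None:
--             best_any = fmt
--     if best_vtt is not None:
--         return best_vtt
--     if best_srt is not None:
--         return best_srt
--     return best_any
-- ===== Notes on version B (the rewrite author's own statement) =====
-- stated objective: alternative
-- what changed: B replaces A's three sequential scans of the format list (vtt pass, srt pass, any-url pass) with one traversal that maintains three first-seen slots and picks the highest-priority filled slot at the end.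
import Mathlib
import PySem

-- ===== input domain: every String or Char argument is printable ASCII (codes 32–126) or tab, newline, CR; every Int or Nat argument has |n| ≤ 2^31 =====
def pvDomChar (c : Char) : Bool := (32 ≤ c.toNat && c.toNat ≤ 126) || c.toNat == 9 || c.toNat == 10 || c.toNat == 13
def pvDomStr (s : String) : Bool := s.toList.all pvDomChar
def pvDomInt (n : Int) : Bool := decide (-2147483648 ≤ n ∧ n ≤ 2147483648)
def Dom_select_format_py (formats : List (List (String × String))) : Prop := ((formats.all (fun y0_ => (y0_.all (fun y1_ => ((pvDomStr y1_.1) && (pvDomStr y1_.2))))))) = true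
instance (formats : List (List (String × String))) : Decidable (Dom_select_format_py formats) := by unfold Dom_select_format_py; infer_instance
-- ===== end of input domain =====

-- B does one traversal with three prioritized first-seen slots instead of A's three scans; same result, alternative structure.

-- ===== PORT A =====
-- dict.get(k): first match in the association list
def pvGetKey (fmt : List (String × String)) (k : String) : Option String :=
  (fmt.find? (fun p => p.1 == k)).map (·.2)

-- truthiness of fmt.get("url") (a str value: truthy iff nonempty)
def pvTruthy (o : Option String) : Bool :=
  match o with
  | some s => s ≠ ""
  | none => false

-- inner loop: first fmt with ext == pe and truthy url
def pvScanExt (pe : String) : List (List (String × String)) → Option (List (String × String))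
  | [] => none
  | fmt :: rest =>
    if pvGetKey fmt "ext" == some pe && pvTruthy (pvGetKey fmt "url") then some fmt
    else pvScanExt pe rest

-- last loop: first fmt with truthy url
def pvScanUrl : List (List (String × String)) → Option (List (String × String))
  | [] => none
  | fmt :: rest => if pvTruthy (pvGetKey fmt "url") then some fmt else pvScanUrl rest

-- outer loop over ("vtt", "srt")
def pvLoopPref (formats : List (List (String × String))) : List String → Option (List (String × String))
  | [] => none
  | pe :: rest =>
    match pvScanExt pe formats with
    | some fmt => some fmt
    | none => pvLoopPref formats rest

def select_format_py (formats : List (List (String × String))) : Option (List (String × String)) :=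
  if formats.isEmpty then none
  else
    match pvLoopPref formats ["vtt", "srt"] with
    | some fmt => some fmt
    | none => pvScanUrl formats

-- ===== PORT B =====
-- one step of B's single pass: fill each still-empty slot if the format qualifies
def pvStep (st : Option (List (String × String)) × Option (List (String × String)) × Option (List (String × String)))
    (fmt : List (String × String)) :
    Option (List (String × String)) × Option (List (String × String)) × Option (List (String × String)) :=
  if !pvTruthy (pvGetKey fmt "url") then st
  else
    let ext := pvGetKey fmt "ext"
    (if st.1.isNone && ext == some "vtt" then some fmt else st.1,
     if st.2.1.isNone && ext == some "srt" then some fmt else st.2.1,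
     if st.2.2.isNone then some fmt else st.2.2)

def select_format_py_alt (formats : List (List (String × String))) : Option (List (String × String)) :=
  let st := formats.foldl pvStep (none, none, none)
  match st.1 with
  | some fmt => some fmt
  | none =>
    match st.2.1 with
    | some fmt => some fmt
    | none => st.2.2

-- ===== PRECONDITION & SPEC =====
def Spec_select_format_py (formats : List (List (String × String))) (out : Option (List (String × String))) : Prop := out = select_format_py_alt formats
instance (formats : List (List (String × String))) (out : Option (List (String × String))) : Decidable (Spec_select_format_py formats out) := by unfold Spec_select_format_py; infer_instance

-- ===== CLAIM (what is proved, stated in full; the proofs are below) =====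
def Claim_equal_select_format_py : Prop := ∀ (formats : List (List (String × String))), Dom_select_format_py formats → Spec_select_format_py formats (select_format_py formats)

-- ===== LEMMAS AND PROOFS =====

-- Option.or versus a conditional slot update
theorem pvOr_if {α : Type} (o : Option α) (c : Bool) (x : α) (r : Option α) :
    (if o.isNone && c then some x else o).or r = o.or (if c then some x else r) := by
  cases o <;> cases c <;> simp [Option.or]

theorem pvOr_some {α : Type} (o : Option α) (x : α) (r : Option α) :
    (if o.isNone then some x else o).or r = o.or (some x) := by
  cases o <;> simp [Option.or]

-- B's fold from any state yields each slot's old value, or else the corresponding first-match scan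
theorem pvStep_foldl (xs : List (List (String × String)))
    (bv bs ba : Option (List (String × String))) :
    xs.foldl pvStep (bv, bs, ba) =
      (bv.or (pvScanExt "vtt" xs), bs.or (pvScanExt "srt" xs), ba.or (pvScanUrl xs)) := by
  induction xs generalizing bv bs ba with
  | nil => simp [pvScanExt, pvScanUrl]
  | cons x xs ih =>
    simp only [List.foldl_cons, pvStep, pvScanExt, pvScanUrl]
    by_cases hu : pvTruthy (pvGetKey x "url")
    · simp only [hu, Bool.not_true, Bool.false_eq_true, if_false, ih, Bool.and_true]
      exact Prod.ext (pvOr_if _ _ _ _) (Prod.ext (pvOr_if _ _ _ _) (pvOr_some _ _ _))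
    · simp [hu, ih]

-- ===== VERDICT (by name: the statement is the Claim_ definition above) =====
theorem select_format_py_spec : Claim_equal_select_format_py := by
  intro formats _
  unfold Spec_select_format_py select_format_py select_format_py_alt
  rw [pvStep_foldl]
  cases formats with
  | nil => simp [pvScanExt, pvScanUrl]
  | cons x xs =>
    simp only [List.isEmpty_cons, if_false, pvLoopPref, Bool.false_eq_true]
    cases h1 : pvScanExt "vtt" (x :: xs) <;>
      cases h2 : pvScanExt "srt" (x :: xs) <;>
        simp [pvLoopPref, h1, h2, Option.or]
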